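-- pv_equiv track=rewrite | github.com/Nicolas-Vinckier/ToolKit | program/AllFile.py | detecter_doublons
-- ===== SOURCE A (Python) =====
-- def detecter_doublons(fichiers):
--     """Détection des fichiers en double."""
--     doublons = {}
--     for fichier in fichiers:
--         if fichier in doublons:
--             doublons[fichier] += 1
--         else:
--             doublons[fichier] = 1
--     return doublons
-- ===== SOURCE B (Python) =====
-- def detecter_doublons(fichiers):
--     """Count each file by scanning once per distinct key, keys in first-occurrence order."""
--     L = list(fichiers)
--     return {x: L.count(x) for x in dict.fromkeys(L)}
-- ===== Notes on version B (the rewrite author's own statement) =====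
-- stated objective: alternative
-- what changed: Replaces the single accumulating dict pass with an ordered dedup of the keys followed by a list.count scan per distinct key.
import Mathlib
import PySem

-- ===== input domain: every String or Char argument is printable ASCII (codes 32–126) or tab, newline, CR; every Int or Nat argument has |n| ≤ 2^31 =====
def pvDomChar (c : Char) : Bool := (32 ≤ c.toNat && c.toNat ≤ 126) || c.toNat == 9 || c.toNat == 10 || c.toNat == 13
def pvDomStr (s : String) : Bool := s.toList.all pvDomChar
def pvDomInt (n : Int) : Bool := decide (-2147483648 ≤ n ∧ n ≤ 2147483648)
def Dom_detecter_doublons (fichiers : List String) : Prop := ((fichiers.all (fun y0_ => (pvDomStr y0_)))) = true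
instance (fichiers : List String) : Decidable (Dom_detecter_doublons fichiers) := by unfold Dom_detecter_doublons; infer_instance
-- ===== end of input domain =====

-- B replaces A's single accumulating dict pass by an ordered dedup of the keys plus a count-scan per distinct key (alternative decomposition, same return value).


-- ===== PORT A =====
def detecter_doublons (fichiers : List String) : List (String × Int) :=
  (fichiers.foldl
    (fun doublons fichier =>
      if doublons.contains fichier then
        doublons.insert fichier (doublons.getD fichier 0 + 1)
      else
        doublons.insert fichier 1)
    PySem.Dict.empty).items

-- ===== PORT B =====
def detecter_doublons_alt (fichiers : List String) : List (String × Int) :=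
  (PySem.List.dedup fichiers).map (fun x => (x, (fichiers.count x : Int)))

-- ===== PRECONDITION & SPEC =====
def Spec_detecter_doublons (fichiers : List String) (out : List (String × Int)) : Prop := out = detecter_doublons_alt fichiers
instance (fichiers : List String) (out : List (String × Int)) : Decidable (Spec_detecter_doublons fichiers out) := by unfold Spec_detecter_doublons; infer_instance

-- ===== CLAIM (what is proved, stated in full; the proofs are below) =====
def Claim_equal_detecter_doublons : Prop := ∀ (fichiers : List String), Dom_detecter_doublons fichiers → Spec_detecter_doublons fichiers (detecter_doublons fichiers)

-- ===== LEMMAS AND PROOFS =====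

-- ===== VERDICT (by name: the statement is the Claim_ definition above) =====
lemma step_eq (d : PySem.Dict String Int) (f : String) :
    (if d.contains f then d.insert f (d.getD f 0 + 1) else d.insert f 1)
      = d.insert f (d.getD f 0 + 1) := by
  by_cases h : d.contains f = true
  · simp [h]
  · have hg : d.get? f = none := by
      cases hx : d.get? f with
      | none => rfl
      | some v => exact absurd (PySem.Dict.contains_eq_isSome_get? d f ▸ (by simp [hx])) h
    simp [h, PySem.Dict.getD, hg]

theorem detecter_doublons_spec : Claim_equal_detecter_doublons := by
  intro fichiers _
  unfold Spec_detecter_doublons detecter_doublons detecter_doublons_alt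
  simp only [step_eq]
  rw [PySem.Dict.foldl_insert_getD_add_one_eq_counter, PySem.Dict.items_counter,
      PySem.List.dedup_eq_ofList]
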